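-- pv_equiv track=rewrite | github.com/apkipa/erabasic-reference | tools/reference_common.py | split_flags
-- ===== SOURCE A (Python) =====
-- def split_flags(expr: str) -> list[str]:
--     if not expr:
--         return []
--     expr = expr.replace("(", " ").replace(")", " ")
--     expr = expr.replace(";", " ")
--     parts: list[str] = []
--     for part in expr.split("|"):
--         token = part.strip()
--         if token:
--             parts.append(token)
--     return parts
-- ===== SOURCE B (Python) =====
-- def split_flags(expr: str) -> list[str]:
--     if not expr:
--         return []
--     parts: list[str] = []
--     buf: list[str] = []
--
--     def flush() -> None:
--         token = "".join(buf).strip()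
--         if token:
--             parts.append(token)
--         buf.clear()
--
--     for ch in expr:
--         if ch == "|":
--             flush()
--         elif ch in "();":
--             buf.append(" ")
--         else:
--             buf.append(ch)
--     flush()
--     return parts
-- ===== Notes on version B (the rewrite author's own statement) =====
-- stated objective: alternative
-- what changed: Replaced the three full-string replace() passes plus split-on-separator/strip pipeline by a single-pass character scanner that maintains a buffer and flushes a stripped token at each separator character.
import Mathlib
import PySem

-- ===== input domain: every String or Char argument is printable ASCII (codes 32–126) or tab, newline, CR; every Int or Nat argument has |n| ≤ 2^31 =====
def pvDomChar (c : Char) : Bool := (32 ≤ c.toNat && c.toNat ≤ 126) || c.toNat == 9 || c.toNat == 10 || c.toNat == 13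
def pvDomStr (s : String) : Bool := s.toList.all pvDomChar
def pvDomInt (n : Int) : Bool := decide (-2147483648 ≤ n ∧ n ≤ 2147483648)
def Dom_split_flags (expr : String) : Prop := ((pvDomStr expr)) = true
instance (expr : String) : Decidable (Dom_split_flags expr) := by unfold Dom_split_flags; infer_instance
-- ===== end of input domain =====

-- B is a single-pass character scanner instead of A's replace/replace/replace + split-on-bar + strip pipeline (objective: alternative).

-- ===== PORT A =====
def split_flags (expr : String) : List String :=
  if expr.toList = [] then []
  else
    let e := PySem.Chars.replace (PySem.Chars.replace (PySem.Chars.replace expr.toList ['('] [' ']) [')'] [' ']) [';'] [' ']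
    (PySem.Chars.splitOn e ['|']).foldl
      (fun parts part =>
        let token := PySem.Chars.strip part
        if token ≠ [] then parts ++ [String.ofList token] else parts) []

-- ===== PORT B =====
def flushB (parts : List String) (buf : List Char) : List String :=
  let token := PySem.Chars.strip buf
  if token ≠ [] then parts ++ [String.ofList token] else parts

def scanB : List Char → List String → List Char → List String
  | [], parts, buf => flushB parts buf
  | c :: rest, parts, buf =>
      if c = '|' then scanB rest (flushB parts buf) []
      else if c = '(' ∨ c = ')' ∨ c = ';' then scanB rest parts (buf ++ [' '])
      else scanB rest parts (buf ++ [c])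

def split_flags_alt (expr : String) : List String :=
  if expr.toList = [] then [] else scanB expr.toList [] []

-- ===== PRECONDITION & SPEC =====
def Spec_split_flags (expr : String) (out : List String) : Prop := out = split_flags_alt expr
instance (expr : String) (out : List String) : Decidable (Spec_split_flags expr out) := by unfold Spec_split_flags; infer_instance

-- ===== CLAIM (what is proved, stated in full; the proofs are below) =====
def Claim_equal_split_flags : Prop := ∀ (expr : String), Dom_split_flags expr → Spec_split_flags expr (split_flags expr)

-- ===== LEMMAS AND PROOFS =====

/-- A's three single-char replaces, pointwise. -/
def replC (c : Char) : Char := if c = '(' ∨ c = ')' ∨ c = ';' then ' ' else c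

/-- Chunk splitter on '|' with a reversed current-chunk accumulator: what splitOn.go computes. -/
def chunksP : List Char → List Char → List (List Char)
  | [], cur => [cur.reverse]
  | c :: t, cur => if c = '|' then cur.reverse :: chunksP t [] else chunksP t (c :: cur)

lemma replace_go_single (a b : Char) : ∀ (fuel : Nat) (l acc : List Char), l.length ≤ fuel →
    PySem.Chars.replace.go [a] [b] fuel l acc = acc.reverse ++ l.map (fun c => if c = a then b else c) := by
  intro fuel
  induction fuel with
  | zero =>
    intro l acc h
    have : l = [] := List.eq_nil_of_length_eq_zero (Nat.le_zero.mp h)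
    subst this; simp [PySem.Chars.replace.go]
  | succ n ih =>
    intro l acc h
    cases l with
    | nil => simp [PySem.Chars.replace.go]
    | cons c t =>
      by_cases hc : c = a
      · subst hc
        have step : PySem.Chars.replace.go [c] [b] (n + 1) (c :: t) acc
            = PySem.Chars.replace.go [c] [b] n t (b :: acc) := by
          simp [PySem.Chars.replace.go, List.isPrefixOf]
        rw [step, ih t (b :: acc) (by simpa using Nat.le_of_succ_le_succ h)]
        simp
      · have step : PySem.Chars.replace.go [a] [b] (n + 1) (c :: t) acc
            = PySem.Chars.replace.go [a] [b] n t (c :: acc) := by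
          simp [PySem.Chars.replace.go, List.isPrefixOf, Ne.symm hc]
        rw [step, ih t (c :: acc) (by simpa using Nat.le_of_succ_le_succ h)]
        simp [hc]

lemma replace_single (a b : Char) (s : List Char) :
    PySem.Chars.replace s [a] [b] = s.map (fun c => if c = a then b else c) := by
  have : PySem.Chars.replace s [a] [b] = PySem.Chars.replace.go [a] [b] s.length s [] := by
    simp [PySem.Chars.replace]
  rw [this, replace_go_single a b s.length s [] (Nat.le_refl _)]
  simp

lemma replace_pipeline (s : List Char) :
    PySem.Chars.replace (PySem.Chars.replace (PySem.Chars.replace s ['('] [' ']) [')'] [' ']) [';'] [' ']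
      = s.map replC := by
  simp only [replace_single, List.map_map]
  apply List.map_congr_left
  intro c _
  simp only [Function.comp, replC]
  by_cases h1 : c = '(' <;> by_cases h2 : c = ')' <;> by_cases h3 : c = ';' <;> simp_all

lemma splitOn_go_single : ∀ (fuel : Nat) (l cur : List Char) (acc : List (List Char)), l.length < fuel →
    PySem.Chars.splitOn.go ['|'] fuel l cur acc = acc.reverse ++ chunksP l cur := by
  intro fuel
  induction fuel with
  | zero => intro l cur acc h; omega
  | succ n ih =>
    intro l cur acc h
    cases l with
    | nil => simp [PySem.Chars.splitOn.go, chunksP]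
    | cons c t =>
      by_cases hc : c = '|'
      · subst hc
        have step : PySem.Chars.splitOn.go ['|'] (n + 1) ('|' :: t) cur acc
            = PySem.Chars.splitOn.go ['|'] n t [] (cur.reverse :: acc) := by
          simp [PySem.Chars.splitOn.go, List.isPrefixOf]
        rw [step, ih t [] (cur.reverse :: acc) (by simpa using Nat.lt_of_succ_lt_succ h)]
        simp [chunksP]
      · have step : PySem.Chars.splitOn.go ['|'] (n + 1) (c :: t) cur acc
            = PySem.Chars.splitOn.go ['|'] n t (c :: cur) acc := by
          simp [PySem.Chars.splitOn.go, List.isPrefixOf, Ne.symm hc]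
        rw [step, ih t (c :: cur) acc (by simpa using Nat.lt_of_succ_lt_succ h)]
        simp [chunksP, hc]

lemma splitOn_single (s : List Char) :
    PySem.Chars.splitOn s ['|'] = chunksP s [] := by
  have : PySem.Chars.splitOn s ['|'] = PySem.Chars.splitOn.go ['|'] (s.length + 1) s [] [] := by
    simp [PySem.Chars.splitOn]
  rw [this, splitOn_go_single (s.length + 1) s [] [] (Nat.lt_succ_self _)]
  simp

lemma scanB_eq : ∀ (cs : List Char) (parts : List String) (buf : List Char),
    scanB cs parts buf = (chunksP (cs.map replC) buf.reverse).foldl flushB parts := by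
  intro cs
  induction cs with
  | nil => intro parts buf; simp [scanB, chunksP, List.foldl]
  | cons c rest ih =>
    intro parts buf
    by_cases hp : c = '|'
    · subst hp
      rw [scanB, if_pos rfl]
      have : replC '|' = '|' := by decide
      simp only [List.map_cons, this, chunksP, List.reverse_reverse]
      rw [ih (flushB parts buf) []]
      rfl
    · by_cases hs : c = '(' ∨ c = ')' ∨ c = ';'
      · rw [scanB, if_neg hp, if_pos hs]
        have h1 : replC c = ' ' := by simp [replC, hs]
        have h2 : (' ' : Char) ≠ '|' := by decide
        simp only [List.map_cons, h1, chunksP, if_neg h2]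
        rw [ih parts (buf ++ [' '])]
        simp
      · rw [scanB, if_neg hp, if_neg hs]
        have h1 : replC c = c := by simp [replC, hs]
        simp only [List.map_cons, h1, chunksP, if_neg hp]
        rw [ih parts (buf ++ [c])]
        simp

-- ===== VERDICT (by name: the statement is the Claim_ definition above) =====
theorem split_flags_spec : Claim_equal_split_flags := by
  intro expr _
  unfold Spec_split_flags split_flags split_flags_alt
  by_cases h : expr.toList = []
  · simp [h]
  · rw [if_neg h, if_neg h]
    simp only [replace_pipeline, splitOn_single]
    rw [scanB_eq expr.toList [] []]
    rfl
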